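-- pv_equiv track=rewrite | github.com/Sopraz/Work | Exercices Dossier 2 Sorbonne.py | decomposition
-- ===== SOURCE A (Python) =====
-- def decomposition(n):
--     tab =[]
--     for i in range(1,n+1):
--         for j in range(1,n+1):
--             for k in range(1,n+1):
--                 if i+j == k:
--                     tuple = i,j,k
--                     tab.append(tuple)
--     return tab
-- ===== SOURCE B (Python) =====
-- def decomposition(n):
--     rows = [[(i, j, i + j) for j in range(1, n - i + 1)] for i in range(1, n)]
--     return [t for row in rows for t in row]
-- ===== Notes on version B (the rewrite author's own statement) =====
-- stated objective: faster
-- what changed: A's cubic triple loop with an equality test is replaced by a staged comprehension: for each i in 1..n-1 build the row of triples (i,j,i+j) for j up to n-i directly (no k-scan), then flatten the rows, yielding the same list in the same order in O(n^2).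
import Mathlib
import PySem

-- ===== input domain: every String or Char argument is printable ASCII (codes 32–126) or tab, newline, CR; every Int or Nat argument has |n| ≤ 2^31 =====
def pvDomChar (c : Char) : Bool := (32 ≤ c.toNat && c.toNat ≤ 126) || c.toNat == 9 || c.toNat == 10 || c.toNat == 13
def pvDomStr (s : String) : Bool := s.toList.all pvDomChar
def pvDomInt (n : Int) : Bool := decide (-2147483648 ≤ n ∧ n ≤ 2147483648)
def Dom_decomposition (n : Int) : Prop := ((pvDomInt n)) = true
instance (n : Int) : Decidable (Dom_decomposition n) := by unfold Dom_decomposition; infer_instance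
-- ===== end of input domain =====

-- B drops the k-scan: it maps each i in 1..n-1 to its row of triples (i,j,i+j), j ≤ n-i, and flattens (O(n^2) vs A's O(n^3)).

-- ===== PORT A =====
def decomposition (n : Int) : List (List Int) :=
  (PySem.List.pyRange 1 (n+1) 1).foldl (fun tab i =>
    (PySem.List.pyRange 1 (n+1) 1).foldl (fun tab j =>
      (PySem.List.pyRange 1 (n+1) 1).foldl (fun tab k =>
        if i + j == k then tab ++ [[i, j, k]] else tab) tab) tab) []

-- ===== PORT B =====
def decomposition_alt (n : Int) : List (List Int) :=
  (((PySem.List.pyRange 1 n 1).map (fun i =>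
      (PySem.List.pyRange 1 (n - i + 1) 1).map (fun j => [i, j, i + j])))).flatten

-- ===== PRECONDITION & SPEC =====
def Spec_decomposition (n : Int) (out : List (List Int)) : Prop := out = decomposition_alt n
instance (n : Int) (out : List (List Int)) : Decidable (Spec_decomposition n out) := by unfold Spec_decomposition; infer_instance

-- ===== CLAIM (what is proved, stated in full; the proofs are below) =====
def Claim_equal_decomposition : Prop := ∀ (n : Int), Dom_decomposition n → Spec_decomposition n (decomposition n)

-- ===== LEMMAS AND PROOFS =====

-- A's innermost k-loop keeps exactly the k equal to i+j, when it is in range.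
theorem pv_filter_eq (a b c : Int) :
    (PySem.List.pyRange a b 1).filter (fun k => c == k) =
      if a ≤ c ∧ c < b then [c] else [] := by
  induction h : (b - a).toNat generalizing a with
  | zero =>
    rw [PySem.List.pyRange_one_eq_nil (by omega)]
    simp only [List.filter_nil]
    rw [if_neg (by omega)]
  | succ m ih =>
    rw [PySem.List.pyRange_one_cons (by omega), List.filter_cons]
    by_cases hc : c = a
    · subst hc
      simp only [beq_self_eq_true, if_pos]
      rw [ih (c + 1) (by omega), if_neg (by omega), if_pos (by omega)]
    · rw [if_neg (by simp [hc]), ih (a + 1) (by omega)]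
      by_cases hcb : a + 1 ≤ c ∧ c < b
      · rw [if_pos hcb, if_pos (by omega)]
      · rw [if_neg hcb, if_neg (by omega)]

theorem pv_inner (n i j : Int) (tab : List (List Int)) :
    (PySem.List.pyRange 1 (n+1) 1).foldl (fun tab k =>
        if i + j == k then tab ++ [[i, j, k]] else tab) tab =
      tab ++ (if 1 ≤ i + j ∧ i + j < n + 1 then [[i, j, i + j]] else []) := by
  rw [PySem.List.foldl_append_if (fun k => i + j == k) (fun k => [i, j, k])
        (PySem.List.pyRange 1 (n+1) 1) tab,
      pv_filter_eq 1 (n+1) (i+j)]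
  split_ifs <;> simp

-- For a fixed i ≥ 1, A's j-loop appends exactly B's row for i.
theorem pv_mid (n i : Int) (hi : 1 ≤ i) (tab : List (List Int)) :
    (PySem.List.pyRange 1 (n+1) 1).foldl (fun tab j =>
      (PySem.List.pyRange 1 (n+1) 1).foldl (fun tab k =>
        if i + j == k then tab ++ [[i, j, k]] else tab) tab) tab =
    tab ++ (PySem.List.pyRange 1 (n-i+1) 1).map (fun j => [i, j, i + j]) := by
  have h1 : ∀ (acc : List (List Int)), ∀ j ∈ PySem.List.pyRange 1 (n+1) 1,
      (PySem.List.pyRange 1 (n+1) 1).foldl (fun tab k =>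
        if i + j == k then tab ++ [[i, j, k]] else tab) acc =
      acc ++ (if 1 ≤ i + j ∧ i + j < n + 1 then [[i, j, i + j]] else []) := by
    intro acc j _; exact pv_inner n i j acc
  rw [PySem.List.foldl_congr_mem _ _ _ tab h1,
      PySem.List.foldl_append_eq_flatMap]
  congr 1
  have hsingle : ∀ (l : List Int), l.flatMap (fun j => ([[i, j, i + j]] : List (List Int))) =
      l.map (fun j => [i, j, i + j]) := by
    intro l; induction l with
    | nil => rfl
    | cons x xs ih => simp [List.flatMap_cons, ih]
  rw [← hsingle (PySem.List.pyRange 1 (n-i+1) 1)]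
  by_cases h : 1 ≤ n - i + 1
  · rw [PySem.List.pyRange_one_append 1 (n-i+1) (n+1) h (by omega), List.flatMap_append]
    have hfst : (PySem.List.pyRange 1 (n-i+1) 1).flatMap
        (fun j => if 1 ≤ i + j ∧ i + j < n + 1 then [[i, j, i + j]] else []) =
        (PySem.List.pyRange 1 (n-i+1) 1).flatMap (fun j => [[i, j, i + j]]) := by
      apply List.flatMap_congr
      intro j hj
      rw [PySem.List.mem_pyRange_one] at hj
      rw [if_pos (by omega)]
    have hsnd : (PySem.List.pyRange (n-i+1) (n+1) 1).flatMap
        (fun j => if 1 ≤ i + j ∧ i + j < n + 1 then [[i, j, i + j]] else []) = [] := by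
      rw [List.flatMap_eq_nil_iff]
      intro j hj
      rw [PySem.List.mem_pyRange_one] at hj
      rw [if_neg (by omega)]
    rw [hfst, hsnd, List.append_nil]
  · rw [PySem.List.pyRange_one_eq_nil (by omega : n - i + 1 ≤ 1)]
    simp only [List.flatMap_nil]
    rw [List.flatMap_eq_nil_iff]
    intro j hj
    rw [PySem.List.mem_pyRange_one] at hj
    rw [if_neg (by omega)]

-- ===== VERDICT (by name: the statement is the Claim_ definition above) =====
theorem decomposition_spec : Claim_equal_decomposition := by
  intro n _
  unfold Spec_decomposition decomposition decomposition_alt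
  have hstep : ∀ (tab : List (List Int)), ∀ i ∈ PySem.List.pyRange 1 (n+1) 1,
      (PySem.List.pyRange 1 (n+1) 1).foldl (fun tab j =>
        (PySem.List.pyRange 1 (n+1) 1).foldl (fun tab k =>
          if i + j == k then tab ++ [[i, j, k]] else tab) tab) tab =
      tab ++ (PySem.List.pyRange 1 (n-i+1) 1).map (fun j => [i, j, i + j]) := by
    intro tab i hi
    exact pv_mid n i ((PySem.List.mem_pyRange_one).1 hi).1 tab
  rw [PySem.List.foldl_congr_mem _ _ _ [] hstep,
      PySem.List.foldl_append_eq_flatMap, List.flatten_eq_flatMap]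
  by_cases h2 : 2 ≤ n
  · rw [show n + 1 = n + 1 by rfl,
        PySem.List.pyRange_one_append 1 n (n+1) (by omega) (by omega),
        List.flatMap_append]
    have hlast : (PySem.List.pyRange n (n+1) 1).flatMap
        (fun i => (PySem.List.pyRange 1 (n-i+1) 1).map (fun j => [i, j, i + j])) = [] := by
      rw [List.flatMap_eq_nil_iff]
      intro i hi
      rw [PySem.List.mem_pyRange_one] at hi
      rw [PySem.List.pyRange_one_eq_nil (by omega)]
      simp
    rw [hlast, List.append_nil]
    simp [List.flatMap_def]
  · rw [PySem.List.pyRange_one_eq_nil (by omega : n ≤ 1)]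
    by_cases h1 : n + 1 ≤ 1
    · rw [PySem.List.pyRange_one_eq_nil h1]; simp
    · -- n = 1 : the single i = 1 contributes an empty row
      have hn : n = 1 := by omega
      subst hn
      decide
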